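-- pv_equiv track=rewrite | github.com/wildercb/privacy_stories_1.1 | prompt_templates.py | format_data_types
-- ===== SOURCE A (Python) =====
-- from typing import Dict, List, Union
--
-- def format_data_types(data_types: Union[Dict, List], level: int = 0) -> str:
--     """Formats data types and their subcategories recursively for prompt clarity."""
--     formatted_text = ""
--     indent = "  " * level  # Indentation for hierarchy
--
--     if isinstance(data_types, list):
--         # Base case: data_types is a list of items
--         formatted_text += indent + ", ".join(data_types) + "\n"
--     elif isinstance(data_types, dict):
--         # Recursive case: data_types is a dictionary with subcategories
--         for category, subcategories in data_types.items():
--             formatted_text += f"{indent}{category}:\n"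
--             formatted_text += format_data_types(subcategories, level + 1)
--     return formatted_text
-- ===== SOURCE B (Python) =====
-- def format_data_types(data_types, level=0):
--     """Iterative reformulation: explicit stack of frames, pre-order output via a buffer."""
--     out = []
--     stack = [(data_types, level)]
--     while stack:
--         frame = stack.pop()
--         if isinstance(frame, str):
--             out.append(frame)
--             continue
--         node, lvl = frame
--         if isinstance(node, list):
--             out.append("  " * lvl + ", ".join(node) + "\n")
--         elif isinstance(node, dict):
--             for category, subcategories in reversed(list(node.items())):
--                 stack.append((subcategories, lvl + 1))
--                 stack.append("  " * lvl + category + ":\n")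
--     return "".join(out)
-- ===== Notes on version B (the rewrite author's own statement) =====
-- stated objective: alternative
-- what changed: Replaces A's recursive string-accumulating formatter by an iterative explicit stack of frames (emit-string / dict-node / list-node) with an output buffer that is joined once at the end, pushing children in reversed order to preserve pre-order.
import Mathlib
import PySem

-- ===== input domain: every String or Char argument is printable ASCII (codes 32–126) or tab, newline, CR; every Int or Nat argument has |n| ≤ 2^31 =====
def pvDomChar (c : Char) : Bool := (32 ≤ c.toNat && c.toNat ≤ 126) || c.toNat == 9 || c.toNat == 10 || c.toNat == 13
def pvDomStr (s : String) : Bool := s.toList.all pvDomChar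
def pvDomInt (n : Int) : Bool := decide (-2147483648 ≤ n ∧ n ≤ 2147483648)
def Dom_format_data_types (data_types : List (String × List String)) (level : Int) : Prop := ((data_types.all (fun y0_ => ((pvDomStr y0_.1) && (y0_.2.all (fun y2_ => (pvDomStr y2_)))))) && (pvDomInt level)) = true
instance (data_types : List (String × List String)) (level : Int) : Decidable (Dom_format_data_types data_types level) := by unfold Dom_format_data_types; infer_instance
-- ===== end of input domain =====

-- B replaces A's recursion by an explicit stack of frames with an output buffer joined
-- at the end (different decomposition, same cost); equivalence of return values is proved.

-- "  " * level (Python string repetition; empty for level ≤ 0) — written literally by both Pythons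
def pvIndent (level : Int) : String := String.ofList (PySem.List.pyRepeat "  ".toList level)

-- ===== PORT A =====
-- A recurses on arbitrary nesting; at the type dict[str, list[str]] the recursive call
-- format_data_types(subcategories, level+1) always takes the isinstance-list branch,
-- transliterated here as format_data_types_leaf.
def format_data_types_leaf (subs : List String) (level : Int) : String :=
  pvIndent level ++ PySem.Str.join ", " subs ++ "\n"

def format_data_types (data_types : List (String × List String)) (level : Int) : String :=
  data_types.foldl
    (fun acc p => acc ++ (pvIndent level ++ p.1 ++ ":\n") ++ format_data_types_leaf p.2 (level + 1))
    ""

-- ===== PORT B =====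
-- a stack frame of Source B: a plain string to emit, a dict node, or a list node
inductive PvFrame where
  | emit : String → PvFrame
  | node : List (String × List String) → Int → PvFrame
  | leaf : List String → Int → PvFrame
deriving Repr

def pvFrameSize : PvFrame → Nat
  | .emit _ => 1
  | .leaf _ _ => 1
  | .node d _ => 1 + 2 * d.length

def pvStackSize (st : List PvFrame) : Nat := (st.map pvFrameSize).sum

-- the inner for-loop of Source B's dict branch: push header/child frames (items already reversed)
def pvPush (lvl : Int) (items : List (String × List String)) (st : List PvFrame) : List PvFrame :=
  items.foldl
    (fun st p => PvFrame.emit (pvIndent lvl ++ p.1 ++ ":\n") :: PvFrame.leaf p.2 (lvl + 1) :: st)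
    st

-- termination measure fact for pvLoop (cited by its decreasing_by)
theorem pvStackSize_pvPush (lvl : Int) (items : List (String × List String)) (st : List PvFrame) :
    pvStackSize (pvPush lvl items st) = 2 * items.length + pvStackSize st := by
  induction items generalizing st with
  | nil => simp [pvPush, pvStackSize]
  | cons p t ih =>
      rw [pvPush, List.foldl_cons]
      rw [show (List.foldl _ _ t : List PvFrame) = pvPush lvl t _ from rfl, ih]
      simp [pvStackSize, pvFrameSize]; omega

-- the while-loop of Source B: pop a frame, emit / expand, accumulate the output buffer
def pvLoop : List PvFrame → List String → List String
  | [], out => out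
  | .emit s :: rest, out => pvLoop rest (out ++ [s])
  | .leaf xs lvl :: rest, out =>
      pvLoop rest (out ++ [pvIndent lvl ++ PySem.Str.join ", " xs ++ "\n"])
  | .node d lvl :: rest, out => pvLoop (pvPush lvl d.reverse rest) out
termination_by st _ => pvStackSize st
decreasing_by
  · simp [pvStackSize, pvFrameSize]
  · simp [pvStackSize, pvFrameSize]
  · rw [pvStackSize_pvPush]; simp [pvStackSize, pvFrameSize]

def format_data_types_alt (data_types : List (String × List String)) (level : Int) : String :=
  PySem.Str.join "" (pvLoop [PvFrame.node data_types level] [])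

-- ===== PRECONDITION & SPEC =====
def Spec_format_data_types (data_types : List (String × List String)) (level : Int) (out : String) : Prop := out = format_data_types_alt data_types level
instance (data_types : List (String × List String)) (level : Int) (out : String) : Decidable (Spec_format_data_types data_types level out) := by unfold Spec_format_data_types; infer_instance

-- ===== CLAIM (what is proved, stated in full; the proofs are below) =====
def Claim_equal_format_data_types : Prop := ∀ (data_types : List (String × List String)) (level : Int), Dom_format_data_types data_types level → Spec_format_data_types data_types level (format_data_types data_types level)

-- ===== LEMMAS AND PROOFS =====

-- "".join on nil / cons / append
theorem pvJoinE_nil : PySem.Str.join "" ([] : List String) = "" := by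
  simp [PySem.Str.join, PySem.Chars.join_nil]

theorem pvJoinE_cons (x : String) (l : List String) :
    PySem.Str.join "" (x :: l) = x ++ PySem.Str.join "" l := by
  cases l <;>
    simp [PySem.Str.join, PySem.Chars.join_nil, PySem.Chars.join_singleton,
      PySem.Chars.join_cons_cons]

theorem pvJoinE_append (a b : List String) :
    PySem.Str.join "" (a ++ b) = PySem.Str.join "" a ++ PySem.Str.join "" b := by
  induction a with
  | nil => simp [pvJoinE_nil]
  | cons x t ih => simp [pvJoinE_cons, ih, String.append_assoc]

-- value of a frame: what the frame contributes to the final output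
def pvDen : PvFrame → String
  | .emit s => s
  | .leaf xs lvl => format_data_types_leaf xs lvl
  | .node d lvl => format_data_types d lvl

-- shape of the stack after expanding a dict frame
theorem pvPush_shape (lvl : Int) (items : List (String × List String)) (st : List PvFrame) :
    pvPush lvl items st =
      (items.reverse.flatMap
        fun p => [PvFrame.emit (pvIndent lvl ++ p.1 ++ ":\n"), PvFrame.leaf p.2 (lvl + 1)]) ++ st := by
  induction items generalizing st with
  | nil => simp [pvPush]
  | cons p t ih =>
      rw [pvPush, List.foldl_cons,
        show (List.foldl _ _ t : List PvFrame) = pvPush lvl t _ from rfl, ih]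
      simp

-- A's fold is the concatenation of its per-item pieces
theorem pvA_eq_join (d : List (String × List String)) (lvl : Int) :
    format_data_types d lvl =
      PySem.Str.join ""
        (d.flatMap fun p => [pvIndent lvl ++ p.1 ++ ":\n", format_data_types_leaf p.2 (lvl + 1)]) := by
  suffices h : ∀ (acc : String),
      d.foldl
        (fun acc p => acc ++ (pvIndent lvl ++ p.1 ++ ":\n") ++ format_data_types_leaf p.2 (lvl + 1))
        acc =
      acc ++ PySem.Str.join ""
        (d.flatMap fun p => [pvIndent lvl ++ p.1 ++ ":\n", format_data_types_leaf p.2 (lvl + 1)]) by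
    simpa [format_data_types] using h ""
  induction d with
  | nil => intro acc; simp [pvJoinE_nil]
  | cons p t ih =>
      intro acc
      rw [List.foldl_cons, ih]
      simp [pvJoinE_cons, String.append_assoc]

-- loop invariant: the joined result of pvLoop is the buffer followed by the frames' values
theorem pvLoop_den (st : List PvFrame) (out : List String) :
    PySem.Str.join "" (pvLoop st out) =
      PySem.Str.join "" out ++ PySem.Str.join "" (st.map pvDen) := by
  induction st, out using pvLoop.induct with
  | case1 out => simp [pvLoop, pvJoinE_nil]
  | case2 s rest out ih =>
      rw [pvLoop, ih, pvJoinE_append]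
      simp [pvJoinE_cons, pvJoinE_nil, pvDen, String.append_assoc]
  | case3 xs lvl rest out ih =>
      rw [pvLoop, ih, pvJoinE_append]
      simp [pvJoinE_cons, pvJoinE_nil, pvDen, format_data_types_leaf, String.append_assoc]
  | case4 d lvl rest out ih =>
      simp only [List.unattach_reverse, List.unattach_attach] at ih
      rw [pvLoop, ih, pvPush_shape]
      simp only [List.map_append, pvJoinE_append, List.map_cons, pvJoinE_cons, pvDen,
        List.map_flatMap]
      rw [pvA_eq_join d lvl]
      simp [String.append_assoc]

-- ===== VERDICT (by name: the statement is the Claim_ definition above) =====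
theorem format_data_types_spec : Claim_equal_format_data_types := by
  intro data_types level _
  unfold Spec_format_data_types format_data_types_alt
  rw [pvLoop_den]
  simp [pvJoinE_nil, pvJoinE_cons, pvDen, String.empty_append]
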